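-- pv_equiv track=rewrite | github.com/KuhuVyas/NydraScribe | src/process_pdfs.py | filter_dense_lists
-- ===== SOURCE A (Python) =====
-- from typing import List
--
-- def filter_dense_lists(outline: List[dict]) -> List[dict]:
--     """Remove consecutive headings of same level that are likely bullet lists"""
--     if len(outline) < 6:
--         return outline
--
--     filtered = []
--     i = 0
--
--     while i < len(outline):
--         current_level = outline[i]["level"]
--         consecutive_count = 1
--
--         # Count consecutive items of same level
--         j = i + 1
--         while j < len(outline) and outline[j]["level"] == current_level:
--             consecutive_count += 1
--             j += 1
--
--         # If more than 5 consecutive items of same level, likely a bullet list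
--         if consecutive_count > 5:
--             # Keep only the first one as a heading, skip the rest
--             filtered.append(outline[i])
--             i = j
--         else:
--             # Keep all items in this group
--             filtered.extend(outline[i:j])
--             i = j
--
--     return filtered
-- ===== SOURCE B (Python) =====
-- def filter_dense_lists(outline):
--     """Remove consecutive headings of same level that are likely bullet lists"""
--     if len(outline) < 6:
--         return outline
--
--     n = len(outline)
--     # DP sweep 1: before[i] = number of earlier items in i's run of equal levels
--     before = [0] * n
--     for i in range(1, n):
--         if outline[i]["level"] == outline[i - 1]["level"]:
--             before[i] = before[i - 1] + 1
--     # DP sweep 2: after[i] = number of later items in i's run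
--     after = [0] * n
--     for i in range(n - 2, -1, -1):
--         if outline[i]["level"] == outline[i + 1]["level"]:
--             after[i] = after[i + 1] + 1
--     # keep an item iff it heads its run or its whole run has at most 5 items
--     return [h for i, h in enumerate(outline)
--             if before[i] == 0 or before[i] + after[i] + 1 <= 5]
-- ===== Notes on version B (the rewrite author's own statement) =====
-- stated objective: alternative
-- what changed: Instead of scanning and collapsing runs on the fly, B makes two dynamic-programming sweeps (left-to-right and right-to-left) computing each element's number of same-level neighbours before and after it, then keeps each element by a per-element predicate (heads its run, or run length at most 5).
import Mathlib
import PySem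

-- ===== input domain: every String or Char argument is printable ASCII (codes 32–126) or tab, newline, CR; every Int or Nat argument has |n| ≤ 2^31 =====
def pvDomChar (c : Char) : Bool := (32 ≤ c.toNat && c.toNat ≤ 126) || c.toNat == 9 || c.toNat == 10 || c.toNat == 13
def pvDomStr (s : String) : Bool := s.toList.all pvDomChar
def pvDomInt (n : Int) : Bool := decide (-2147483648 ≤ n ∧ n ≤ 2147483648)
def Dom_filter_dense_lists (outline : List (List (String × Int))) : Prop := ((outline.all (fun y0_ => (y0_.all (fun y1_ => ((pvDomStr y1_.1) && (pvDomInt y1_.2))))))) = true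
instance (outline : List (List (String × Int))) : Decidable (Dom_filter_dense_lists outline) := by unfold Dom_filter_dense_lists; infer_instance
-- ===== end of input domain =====

-- B replaces A's on-the-fly run-collapsing scan by two DP sweeps (before/after counts of
-- same-level neighbours) followed by a per-element keep predicate; equivalence of RETURN
-- values, inputs with a heading lacking "level" excluded by Pre_.

-- ===== PORT A =====

-- h["level"]: first match in the association list; total stand-in returning 0 where Python
-- raises KeyError — such inputs are outside Pre_filter_dense_lists.
def pvLevel (d : List (String × Int)) : Int :=
  ((d.find? (fun p => p.1 == "level")).map (·.2)).getD 0

-- inner `while j < len(outline) and outline[j]["level"] == current_level: j += 1`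
def pvCountRun (outline : List (List (String × Int))) (lv : Int) (j : Nat) : Nat :=
  if _h : j < outline.length ∧ pvLevel (outline.getD j []) = lv then
    pvCountRun outline lv (j + 1)
  else j
termination_by outline.length - j

theorem pvCountRun_ge (outline : List (List (String × Int))) (lv : Int) (j : Nat) :
    j ≤ pvCountRun outline lv j := by
  fun_induction pvCountRun outline lv j with
  | case1 j h ih => omega
  | case2 j h => omega

-- outer `while i < len(outline)` loop; outline[i:j] = (outline.drop i).take (j - i) (nonneg in-range slice)
def pvLoopA (outline : List (List (String × Int))) (i : Nat)
    (filtered : List (List (String × Int))) : List (List (String × Int)) :=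
  if _h : i < outline.length then
    let lv := pvLevel (outline.getD i [])
    let j := pvCountRun outline lv (i + 1)
    if 5 < j - i then
      pvLoopA outline j (filtered ++ [outline.getD i []])
    else
      pvLoopA outline j (filtered ++ (outline.drop i).take (j - i))
  else filtered
termination_by outline.length - i
decreasing_by
  all_goals have h1 := pvCountRun_ge outline lv (i + 1)
  all_goals have h2 : pvCountRun outline lv (i + 1)
      = pvCountRun outline (pvLevel (outline.getD i [])) (i + 1) := rfl
  all_goals omega

def filter_dense_lists (outline : List (List (String × Int))) : List (List (String × Int)) :=
  if outline.length < 6 then outline else pvLoopA outline 0 []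

-- ===== PORT B =====

-- sweep 1, `for i in range(1, n): before[i] = before[i-1]+1 if same level else 0`:
-- carries the previous level and previous before-value down the list
def pvBeforeGo (prevL : Int) (prevB : Nat) : List Int → List Nat
  | [] => []
  | l :: t => (if l == prevL then prevB + 1 else 0) ::
      pvBeforeGo l (if l == prevL then prevB + 1 else 0) t

def pvBefore : List Int → List Nat
  | [] => []
  | l :: t => 0 :: pvBeforeGo l 0 t

-- sweep 2, the backwards loop `for i in range(n-2, -1, -1)`: structural recursion from the right
def pvAfter : List Int → List Nat
  | [] => []
  | [_] => [0]
  | a :: b :: t =>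
    (if a == b then (pvAfter (b :: t)).headD 0 + 1 else 0) :: pvAfter (b :: t)

-- final comprehension `[h for i, h in enumerate(outline) if before[i] == 0 or before[i]+after[i]+1 <= 5]`
-- rendered as zip-with-the-two-tables + filter + project
def filter_dense_lists_alt (outline : List (List (String × Int))) : List (List (String × Int)) :=
  if outline.length < 6 then outline else
    let lvls := outline.map pvLevel
    let bf := pvBefore lvls
    let af := pvAfter lvls
    ((outline.zip (bf.zip af)).filter
        (fun p => p.2.1 == 0 || decide (p.2.1 + p.2.2 + 1 ≤ 5))).map (·.1)

-- ===== PRECONDITION & SPEC =====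
-- Pre_ excludes inputs of length ≥ 6 containing a heading without a "level" key, on which A (and B) raise KeyError.
def Pre_filter_dense_lists (outline : List (List (String × Int))) : Prop :=
  outline.length < 6 ∨ ∀ h ∈ outline, (h.find? (fun p => p.1 == "level")).isSome
instance (outline : List (List (String × Int))) : Decidable (Pre_filter_dense_lists outline) := by
  unfold Pre_filter_dense_lists; infer_instance

def pvWitness_filter_dense_lists : (List (List (String × Int))) :=
  [[("level", 1)], [("level", 1)], [("level", 2)], [("level", 2)], [("level", 2)], [("level", 1)]]

def Spec_filter_dense_lists (outline : List (List (String × Int))) (out : List (List (String × Int))) : Prop := out = filter_dense_lists_alt outline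
instance (outline : List (List (String × Int))) (out : List (List (String × Int))) : Decidable (Spec_filter_dense_lists outline out) := by unfold Spec_filter_dense_lists; infer_instance

-- ===== CLAIM (what is proved, stated in full; the proofs are below) =====
def Claim_equal_filter_dense_lists : Prop := ∀ (outline : List (List (String × Int))), Dom_filter_dense_lists outline → Pre_filter_dense_lists outline → Spec_filter_dense_lists outline (filter_dense_lists outline)

-- ===== LEMMAS AND PROOFS =====

-- the maximal runs of equal level (the common characterisation both ports are reduced to)
def pvRuns : List (List (String × Int)) → List (List (List (String × Int)))
  | [] => []
  | h :: t =>
    (h :: t.takeWhile (fun x => pvLevel x == pvLevel h)) ::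
      pvRuns (t.dropWhile (fun x => pvLevel x == pvLevel h))
termination_by l => l.length
decreasing_by
  have := List.length_dropWhile_le (fun x => pvLevel x == pvLevel h) t
  simp; omega

def pvCollapse (r : List (List (String × Int))) : List (List (String × Int)) :=
  if 5 < r.length then r.take 1 else r

theorem pvBefore_cons (l : Int) (t : List Int) :
    pvBefore (l :: t) = 0 :: pvBeforeGo l 0 t := rfl

theorem pvGetD_of_lt (outline : List (List (String × Int))) {j : Nat}
    (h : j < outline.length) : outline.getD j [] = outline[j] := by
  simp [List.getD_eq_getElem?_getD, List.getElem?_eq_getElem h]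

theorem pvCountRun_eq (outline : List (List (String × Int))) (lv : Int) (j : Nat) :
    pvCountRun outline lv j
      = j + ((outline.drop j).takeWhile (fun x => pvLevel x == lv)).length := by
  fun_induction pvCountRun outline lv j with
  | case1 j h ih =>
    obtain ⟨hj, hlv⟩ := h
    rw [pvGetD_of_lt outline hj] at hlv
    rw [List.drop_eq_getElem_cons hj, List.takeWhile_cons]
    simp [hlv, ih]; omega
  | case2 j h =>
    by_cases hj : j < outline.length
    · have hlv : ¬ pvLevel outline[j] = lv := fun hc => h ⟨hj, (pvGetD_of_lt outline hj) ▸ hc⟩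
      rw [List.drop_eq_getElem_cons hj, List.takeWhile_cons]
      simp [hlv]
    · rw [List.drop_eq_nil_of_le (by omega)]; simp

theorem drop_len_takeWhile {α : Type} (p : α → Bool) (t : List α) :
    t.drop (t.takeWhile p).length = t.dropWhile p := by
  have h2 : (t.takeWhile p ++ t.dropWhile p).drop (t.takeWhile p).length = t.dropWhile p :=
    List.drop_left
  rw [List.takeWhile_append_dropWhile] at h2; exact h2
theorem take_len_takeWhile {α : Type} (p : α → Bool) (t : List α) :
    t.take (t.takeWhile p).length = t.takeWhile p := by
  have h2 : (t.takeWhile p ++ t.dropWhile p).take (t.takeWhile p).length = t.takeWhile p :=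
    List.take_left
  rw [List.takeWhile_append_dropWhile] at h2; exact h2

theorem pvLoopA_eq_foldl_fuel (outline : List (List (String × Int))) (n : Nat) :
    ∀ (i : Nat) (acc : List (List (String × Int))), outline.length - i ≤ n →
    pvLoopA outline i acc
      = (pvRuns (outline.drop i)).foldl
          (fun acc items => if 5 < items.length then acc ++ items.take 1 else acc ++ items) acc := by
  induction n with
  | zero =>
    intro i acc hn
    rw [pvLoopA, dif_neg (by omega), List.drop_eq_nil_of_le (by omega), pvRuns, List.foldl_nil]
  | succ n ih =>
    intro i acc hn
    by_cases hi : i < outline.length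
    · have hget := pvGetD_of_lt outline hi
      have hj := pvCountRun_eq outline (pvLevel outline[i]) (i + 1)
      have hjge := pvCountRun_ge outline (pvLevel outline[i]) (i + 1)
      rw [pvLoopA, dif_pos hi]
      simp only [hget]
      rw [List.drop_eq_getElem_cons hi, pvRuns, List.foldl_cons]
      have hdrop : outline.drop (pvCountRun outline (pvLevel outline[i]) (i + 1))
          = (outline.drop (i + 1)).dropWhile (fun x => pvLevel x == pvLevel outline[i]) := by
        rw [hj, ← List.drop_drop, drop_len_takeWhile]
      by_cases hd : 5 < pvCountRun outline (pvLevel outline[i]) (i + 1) - i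
      · rw [if_pos hd,
          ih _ _ (by omega), hdrop,
          if_pos (by simp only [List.length_cons]; omega)]
        rfl
      · rw [if_neg hd,
          ih _ _ (by omega), hdrop,
          if_neg (by simp only [List.length_cons]; omega)]
        have hslice : (outline[i] :: outline.drop (i + 1)).take
              (pvCountRun outline (pvLevel outline[i]) (i + 1) - i)
            = outline[i] :: (outline.drop (i + 1)).takeWhile (fun x => pvLevel x == pvLevel outline[i]) := by
          have h1 : pvCountRun outline (pvLevel outline[i]) (i + 1) - i
              = ((outline.drop (i + 1)).takeWhile (fun x => pvLevel x == pvLevel outline[i])).length + 1 := by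
            omega
          rw [h1, List.take_succ_cons, take_len_takeWhile]
        rw [hslice]
    · rw [pvLoopA, dif_neg hi, List.drop_eq_nil_of_le (by omega), pvRuns, List.foldl_nil]

theorem foldl_collapse (l : List (List (List (String × Int)))) (acc : List (List (String × Int))) :
    l.foldl (fun acc items => if 5 < items.length then acc ++ items.take 1 else acc ++ items) acc
      = acc ++ (l.map pvCollapse).flatten := by
  induction l generalizing acc with
  | nil => simp
  | cons r t ih =>
    simp only [List.foldl_cons, List.map_cons, List.flatten_cons, ih, pvCollapse]
    split_ifs <;> simp

-- B-side: the two sweeps on a run `replicate`-prefix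
theorem pvBeforeGo_replicate (lv : Int) (m b : Nat) (rs : List Int) :
    pvBeforeGo lv b (List.replicate m lv ++ rs)
      = List.range' (b + 1) m ++ pvBeforeGo lv (b + m) rs := by
  induction m generalizing b with
  | zero => simp
  | succ m ih =>
    rw [List.replicate_succ, List.cons_append, pvBeforeGo]
    simp only [BEq.rfl, if_pos]
    have hb : b + 1 + m = b + (m + 1) := by omega
    rw [ih (b + 1), hb, List.range'_succ, List.cons_append]

theorem pvBeforeGo_fresh (lv l : Int) (b : Nat) (t : List Int) (h : (l == lv) = false) :
    pvBeforeGo lv b (l :: t) = pvBefore (l :: t) := by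
  rw [pvBeforeGo, pvBefore, h]; simp

theorem pvAfter_replicate (lv : Int) (k : Nat) (rs : List Int)
    (hrs : ∀ r, rs.head? = some r → (lv == r) = false) :
    pvAfter (List.replicate (k + 1) lv ++ rs)
      = (List.range (k + 1)).reverse ++ pvAfter rs := by
  induction k with
  | zero =>
    cases rs with
    | nil => rfl
    | cons r rs' =>
      have h := hrs r rfl
      simp [pvAfter, h, List.range_succ]
  | succ k ih =>
    rw [List.replicate_succ, List.cons_append]
    have hrepl : List.replicate (k + 1) lv ++ rs
        = lv :: (List.replicate k lv ++ rs) := by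
      rw [List.replicate_succ, List.cons_append]
    rw [hrepl, pvAfter, ← hrepl, ih]
    have hhead : ((List.range (k + 1)).reverse ++ pvAfter rs).headD 0 = k := by
      rw [List.range_succ]; simp
    simp only [BEq.rfl, if_pos, hhead]
    rw [List.range_succ (n := k + 1)]
    simp

theorem range_zip_reverse (n : Nat) :
    (List.range n).zip ((List.range n).reverse)
      = (List.range n).map (fun i => (i, n - 1 - i)) := by
  apply List.ext_getElem
  · simp
  · intro i h1 h2
    simp only [List.getElem_zip, List.getElem_map, List.getElem_reverse, List.getElem_range]
    simp at h1
    congr 1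
    simp

theorem map_fst_zip_self {α β : Type} (l : List α) (l2 : List β) (h : l.length ≤ l2.length) :
    (l.zip l2).map (·.1) = l := List.map_fst_zip h

-- the core of B equals the concatenation of collapsed runs
theorem pvAltCore_eq_runs (outline : List (List (String × Int))) :
    ((outline.zip ((pvBefore (outline.map pvLevel)).zip (pvAfter (outline.map pvLevel)))).filter
        (fun p => p.2.1 == 0 || decide (p.2.1 + p.2.2 + 1 ≤ 5))).map (·.1)
      = ((pvRuns outline).map pvCollapse).flatten := by
  fun_induction pvRuns outline with
  | case1 => simp [pvBefore, pvAfter]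
  | case2 h t ih =>
    have hrepl : (t.takeWhile (fun x => pvLevel x == pvLevel h)).map pvLevel
        = List.replicate (t.takeWhile (fun x => pvLevel x == pvLevel h)).length (pvLevel h) := by
      rw [List.eq_replicate_iff]
      refine ⟨by simp, ?_⟩
      intro b hb
      obtain ⟨x, hx, rfl⟩ := List.mem_map.mp hb
      have := List.mem_takeWhile_imp hx
      simpa using this
    have hhd : ∀ r, ((t.dropWhile (fun x => pvLevel x == pvLevel h)).map pvLevel).head? = some r →
        (pvLevel h == r) = false := by
      intro r hr
      rw [List.head?_map] at hr
      cases hd : (t.dropWhile (fun x => pvLevel x == pvLevel h)).head? with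
      | none => rw [hd] at hr; simp at hr
      | some d =>
        rw [hd] at hr
        simp only [Option.map_some, Option.some.injEq] at hr
        have hne : t.dropWhile (fun x => pvLevel x == pvLevel h) ≠ [] := by
          intro hc; rw [hc] at hd; simp at hd
        have hnot := List.head_dropWhile_not (fun x => pvLevel x == pvLevel h) hne
        rw [List.head?_eq_some_head hne] at hd
        simp only [Option.some.injEq] at hd
        subst hd
        rw [← hr]
        simp only [beq_eq_false_iff_ne] at hnot ⊢
        exact fun hc => hnot hc.symm
    have hlevels : (h :: t).map pvLevel
        = List.replicate ((t.takeWhile (fun x => pvLevel x == pvLevel h)).length + 1) (pvLevel h)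
            ++ (t.dropWhile (fun x => pvLevel x == pvLevel h)).map pvLevel := by
      conv_lhs => rw [List.map_cons, ← List.takeWhile_append_dropWhile
        (p := fun x => pvLevel x == pvLevel h) (l := t)]
      rw [List.map_append, hrepl, List.replicate_succ, List.cons_append]
    have hbfgo : pvBeforeGo (pvLevel h) (t.takeWhile (fun x => pvLevel x == pvLevel h)).length
          ((t.dropWhile (fun x => pvLevel x == pvLevel h)).map pvLevel)
        = pvBefore ((t.dropWhile (fun x => pvLevel x == pvLevel h)).map pvLevel) := by
      cases htd : (t.dropWhile (fun x => pvLevel x == pvLevel h)).map pvLevel with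
      | nil => rfl
      | cons r rs =>
        apply pvBeforeGo_fresh
        have := hhd r (by rw [htd]; rfl)
        simp only [beq_eq_false_iff_ne] at this ⊢
        exact fun hc => this hc.symm
    have hbf : pvBefore ((h :: t).map pvLevel)
        = List.range ((t.takeWhile (fun x => pvLevel x == pvLevel h)).length + 1)
            ++ pvBefore ((t.dropWhile (fun x => pvLevel x == pvLevel h)).map pvLevel) := by
      rw [hlevels, List.replicate_succ, List.cons_append, pvBefore_cons,
        pvBeforeGo_replicate, Nat.zero_add, Nat.zero_add, hbfgo,
        List.range_eq_range', List.range'_succ, List.cons_append, Nat.zero_add]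
    have haf : pvAfter ((h :: t).map pvLevel)
        = (List.range ((t.takeWhile (fun x => pvLevel x == pvLevel h)).length + 1)).reverse
            ++ pvAfter ((t.dropWhile (fun x => pvLevel x == pvLevel h)).map pvLevel) := by
      rw [hlevels]
      exact pvAfter_replicate _ _ _ hhd
    have hzip2 : (pvBefore ((h :: t).map pvLevel)).zip (pvAfter ((h :: t).map pvLevel))
        = ((List.range ((t.takeWhile (fun x => pvLevel x == pvLevel h)).length + 1)).map
              (fun i => (i, (t.takeWhile (fun x => pvLevel x == pvLevel h)).length - i)))
          ++ ((pvBefore ((t.dropWhile (fun x => pvLevel x == pvLevel h)).map pvLevel)).zip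
              (pvAfter ((t.dropWhile (fun x => pvLevel x == pvLevel h)).map pvLevel))) := by
      rw [hbf, haf, List.zip_append (by simp), range_zip_reverse]
      simp
    rw [hzip2]
    conv_lhs => rw [show h :: t
        = (h :: t.takeWhile (fun x => pvLevel x == pvLevel h))
          ++ t.dropWhile (fun x => pvLevel x == pvLevel h) by
        simp [List.takeWhile_append_dropWhile]]
    rw [List.zip_append (by simp), List.filter_append, List.map_append, ih,
      List.map_cons, List.flatten_cons]
    congr 1
    -- the run part
    rw [List.range_eq_range', List.range'_succ, Nat.zero_add, List.map_cons, List.zip_cons_cons]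
    have hmem : ∀ x ∈ (t.takeWhile (fun x => pvLevel x == pvLevel h)).zip
          ((List.range' 1 (t.takeWhile (fun x => pvLevel x == pvLevel h)).length).map
            (fun i => (i, (t.takeWhile (fun x => pvLevel x == pvLevel h)).length - i))),
        (x.2.1 == 0) = false
          ∧ x.2.1 + x.2.2 + 1 = (t.takeWhile (fun x => pvLevel x == pvLevel h)).length + 1 := by
      intro x hx
      rcases x with ⟨x1, x2⟩
      have h2 := (List.of_mem_zip hx).2
      obtain ⟨i, hi, rfl⟩ := List.mem_map.mp h2
      have hir := List.mem_range'_1.mp hi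
      refine ⟨by simp; omega, by simp; omega⟩
    by_cases hk : 5 < (t.takeWhile (fun x => pvLevel x == pvLevel h)).length + 1
    · have hnil : ((t.takeWhile (fun x => pvLevel x == pvLevel h)).zip
            ((List.range' 1 (t.takeWhile (fun x => pvLevel x == pvLevel h)).length).map
              (fun i => (i, (t.takeWhile (fun x => pvLevel x == pvLevel h)).length - i)))).filter
            (fun p => p.2.1 == 0 || decide (p.2.1 + p.2.2 + 1 ≤ 5)) = [] := by
        rw [List.filter_eq_nil_iff]
        intro a ha
        obtain ⟨h1, h2⟩ := hmem a ha
        simp only [h1, Bool.false_or, Bool.not_eq_true, decide_eq_false_iff_not]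
        omega
      rw [List.filter_cons_of_pos (by simp), hnil]
      unfold pvCollapse
      rw [if_pos (by simp only [List.length_cons]; omega)]
      simp
    · have hall : ((t.takeWhile (fun x => pvLevel x == pvLevel h)).zip
            ((List.range' 1 (t.takeWhile (fun x => pvLevel x == pvLevel h)).length).map
              (fun i => (i, (t.takeWhile (fun x => pvLevel x == pvLevel h)).length - i)))).filter
            (fun p => p.2.1 == 0 || decide (p.2.1 + p.2.2 + 1 ≤ 5))
          = (t.takeWhile (fun x => pvLevel x == pvLevel h)).zip
            ((List.range' 1 (t.takeWhile (fun x => pvLevel x == pvLevel h)).length).map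
              (fun i => (i, (t.takeWhile (fun x => pvLevel x == pvLevel h)).length - i))) := by
        rw [List.filter_eq_self]
        intro a ha
        obtain ⟨h1, h2⟩ := hmem a ha
        simp only [Bool.or_eq_true, decide_eq_true_eq]
        right; omega
      rw [List.filter_cons_of_pos (by simp), hall]
      unfold pvCollapse
      rw [if_neg (by simp only [List.length_cons]; omega)]
      simp only [List.map_cons]
      rw [map_fst_zip_self _ _ (by simp)]

-- ===== VERDICT (by name: the statement is the Claim_ definition above) =====
theorem filter_dense_lists_spec : Claim_equal_filter_dense_lists := by
  intro outline _ _
  unfold Spec_filter_dense_lists filter_dense_lists filter_dense_lists_alt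
  by_cases h : outline.length < 6
  · rw [if_pos h, if_pos h]
  · rw [if_neg h, if_neg h, pvLoopA_eq_foldl_fuel outline outline.length 0 [] (by omega),
      List.drop_zero, foldl_collapse, List.nil_append, pvAltCore_eq_runs]
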